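-- pv_equiv track=rewrite | github.com/Silicogen-Labs/machine-learning-theories | rtl_analyzer/rtl_analyzer/dataflow.py | _strip_case_label
-- ===== SOURCE A (Python) =====
-- def _strip_case_label(text: str) -> str:
--     colon_index = text.find(":")
--     if colon_index == -1:
--         return text
--
--     eq_index = text.find("=")
--     le_index = text.find("<=")
--     assignment_index = min(
--         [index for index in (eq_index, le_index) if index != -1],
--         default=-1,
--     )
--
--     if assignment_index == -1 or colon_index < assignment_index:
--         return text[colon_index + 1 :].strip()
--
--     return text
-- ===== SOURCE B (Python) =====
-- def _strip_case_label(text: str) -> str: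
--     # Single left-to-right scan: the first '=' or ':' encountered decides everything.
--     for i, ch in enumerate(text):
--         if ch == '=':
--             return text
--         if ch == ':':
--             return text[i + 1:].strip()
--     return text
-- ===== Notes on version B (the rewrite author's own statement) =====
-- stated objective: alternative
-- what changed: Replaces A's three substring find() passes plus min-of-filtered-indices bookkeeping with one left-to-right character scan that returns at the first '=' or ':' seen (an '=' seen first covers both '=' and '<=' of A, since '<=' contains '='), so no index list, no min, and no prefix test is ever built.
import Mathlib
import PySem

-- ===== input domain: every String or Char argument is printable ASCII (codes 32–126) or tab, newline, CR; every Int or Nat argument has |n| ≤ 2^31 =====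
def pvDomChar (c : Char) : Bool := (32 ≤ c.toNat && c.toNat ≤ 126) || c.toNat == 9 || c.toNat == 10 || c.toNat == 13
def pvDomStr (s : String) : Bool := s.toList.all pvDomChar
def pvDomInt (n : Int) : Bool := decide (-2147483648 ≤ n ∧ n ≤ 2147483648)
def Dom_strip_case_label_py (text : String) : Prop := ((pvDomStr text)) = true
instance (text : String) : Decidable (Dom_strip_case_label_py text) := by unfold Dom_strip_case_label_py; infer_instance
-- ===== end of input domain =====

-- B replaces A's three find() passes and min-of-indices bookkeeping with one left-to-right
-- character scan that decides at the first '=' or ':' seen (alternative decomposition, same O(n) cost).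


-- ===== PORT A =====
def strip_case_label_py (text : String) : String :=
  let colon_index := PySem.Str.find text ":"
  if colon_index = -1 then text
  else
    let eq_index := PySem.Str.find text "="
    let le_index := PySem.Str.find text "<="
    let assignment_index :=
      (PySem.List.min? (([eq_index, le_index]).filter fun i => !(i == -1)) (fun y => y)).getD (-1)
    if assignment_index = -1 ∨ colon_index < assignment_index then
      PySem.Str.strip (PySem.Str.slice text (some (colon_index + 1)) none)
    else text

-- ===== PORT B =====
-- the for-loop over enumerate(text): structural recursion over the characters with the index i
def stripScan (text : String) : List Char → Nat → String
  | [], _ => text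
  | c :: rest, i =>
    if c = '=' then text
    else if c = ':' then PySem.Str.strip (PySem.Str.slice text (some ((i : Int) + 1)) none)
    else stripScan text rest (i + 1)

def strip_case_label_py_alt (text : String) : String :=
  stripScan text text.toList 0

-- ===== PRECONDITION & SPEC =====
def Spec_strip_case_label_py (text : String) (out : String) : Prop := out = strip_case_label_py_alt text
instance (text : String) (out : String) : Decidable (Spec_strip_case_label_py text out) := by unfold Spec_strip_case_label_py; infer_instance

-- ===== CLAIM (what is proved, stated in full; the proofs are below) =====
def Claim_equal_strip_case_label_py : Prop := ∀ (text : String), Dom_strip_case_label_py text → Spec_strip_case_label_py text (strip_case_label_py text)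

-- ===== LEMMAS AND PROOFS =====

-- [c] is a prefix of s.drop k iff the character at k is c
theorem singleton_prefix_drop_iff (s : List Char) (k : Nat) (c : Char) :
    [c] <+: s.drop k ↔ s[k]? = some c := by
  rw [← List.head?_drop]
  constructor
  · rintro ⟨t, ht⟩; rw [← ht]; rfl
  · intro h
    cases hd : s.drop k with
    | nil => rw [hd] at h; simp at h
    | cons a t =>
      rw [hd] at h; simp at h
      exact ⟨t, by simp [hd, h]⟩

-- singleton-pattern find: the character at the found index
theorem find_single_char_at (cs : List Char) (a : Char) (h : PySem.Chars.find cs [a] ≠ -1) :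
    cs[(PySem.Chars.find cs [a]).toNat]? = some a := by
  have h0 : 0 ≤ PySem.Chars.find cs [a] := by
    have := PySem.Chars.neg_one_le_find cs [a]; omega
  exact (singleton_prefix_drop_iff cs _ a).mp (PySem.Chars.find_spec (s := cs) (sub := [a]) h0).1

-- singleton-pattern find: minimality as "no earlier occurrence of the character"
theorem find_single_char_min (cs : List Char) (a : Char) (h0 : 0 ≤ PySem.Chars.find cs [a])
    (j : Nat) (hj : j < (PySem.Chars.find cs [a]).toNat) : cs[j]? ≠ some a := by
  obtain ⟨-, hmin⟩ := PySem.Chars.find_spec (s := cs) (sub := [a]) h0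
  intro hja
  exact hmin j hj ((singleton_prefix_drop_iff cs j a).mpr hja)

-- an occurrence at j bounds the singleton find from above
theorem find_single_char_le (cs : List Char) (a : Char) (j : Nat) (hj : cs[j]? = some a) :
    PySem.Chars.find cs [a] ≠ -1 ∧ (PySem.Chars.find cs [a]).toNat ≤ j := by
  have hinf : [a] <:+: cs := (List.singleton_infix_iff a cs).mpr (List.mem_of_getElem? hj)
  have hne : PySem.Chars.find cs [a] ≠ -1 := (PySem.Chars.find_ne_neg_one_iff cs [a]).mpr hinf
  refine ⟨hne, ?_⟩
  by_contra hlt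
  exact find_single_char_min cs a (by have := PySem.Chars.neg_one_le_find cs [a]; omega) j
    (by omega) hj

-- how the singleton find unfolds over a cons cell
theorem find_single_cons (a : Char) (l : List Char) (c : Char) :
    PySem.Chars.find (a :: l) [c] =
      if a = c then 0
      else if PySem.Chars.find l [c] = -1 then -1 else PySem.Chars.find l [c] + 1 := by
  by_cases hac : a = c
  · subst hac
    have hocc : (a :: l)[0]? = some a := rfl
    obtain ⟨hne, hle⟩ := find_single_char_le (a :: l) a 0 hocc
    have := PySem.Chars.neg_one_le_find (a :: l) [a]
    rw [if_pos rfl]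
    omega
  · rw [if_neg hac]
    by_cases hl : PySem.Chars.find l [c] = -1
    · rw [if_pos hl]
      rw [PySem.Chars.find_eq_neg_one_iff] at hl ⊢
      rw [List.singleton_infix_iff] at hl ⊢
      rw [List.mem_cons]
      push_neg
      exact ⟨fun h => hac h.symm, hl⟩
    · rw [if_neg hl]
      have h0 : 0 ≤ PySem.Chars.find l [c] := by
        have := PySem.Chars.neg_one_le_find l [c]; omega
      have hat : l[(PySem.Chars.find l [c]).toNat]? = some c := find_single_char_at l c hl
      have hocc : (a :: l)[(PySem.Chars.find l [c]).toNat + 1]? = some c := by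
        simpa using hat
      obtain ⟨hne, hle⟩ := find_single_char_le (a :: l) c _ hocc
      have h0' : 0 ≤ PySem.Chars.find (a :: l) [c] := by
        have := PySem.Chars.neg_one_le_find (a :: l) [c]; omega
      -- find (a::l) cannot be 0 (head is not c) nor point below find l + 1
      have hne0 : (PySem.Chars.find (a :: l) [c]).toNat ≠ 0 := by
        intro h
        have := find_single_char_at (a :: l) c hne
        rw [h] at this
        simp at this
        exact hac this
      have hge : ¬ (PySem.Chars.find (a :: l) [c]).toNat < (PySem.Chars.find l [c]).toNat + 1 := by
        intro hlt
        obtain ⟨j, hj⟩ : ∃ j, (PySem.Chars.find (a :: l) [c]).toNat = j + 1 :=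
          ⟨(PySem.Chars.find (a :: l) [c]).toNat - 1, by omega⟩
        have hat' := find_single_char_at (a :: l) c hne
        rw [hj] at hat'
        simp at hat'
        exact find_single_char_min l c h0 j (by omega) hat'
      omega

-- the scan's value, characterised by find/isIn on the remaining suffix
theorem stripScan_spec (text : String) (l : List Char) (i : Nat) :
    stripScan text l i =
      if PySem.Chars.find l [':'] ≠ -1 ∧
          PySem.Chars.isIn ['='] (l.take (PySem.Chars.find l [':']).toNat) = false
      then PySem.Str.strip (PySem.Str.slice text (some ((i : Int) + PySem.Chars.find l [':'] + 1)) none)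
      else text := by
  induction l generalizing i with
  | nil =>
    have h : PySem.Chars.find ([] : List Char) [':'] = -1 := by decide
    simp [stripScan, h]
  | cons a rest ih =>
    rw [stripScan]
    by_cases ha : a = '='
    · subst ha
      rw [if_pos rfl, find_single_cons, if_neg (by decide : ¬ ('=' : Char) = ':')]
      by_cases hr : PySem.Chars.find rest [':'] = -1
      · rw [if_pos hr, if_neg (by rintro ⟨h, -⟩; exact h rfl)]
      · rw [if_neg hr]
        have h0 : 0 ≤ PySem.Chars.find rest [':'] := by
          have := PySem.Chars.neg_one_le_find rest [':']; omega
        have htn : (PySem.Chars.find rest [':'] + 1).toNat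
            = (PySem.Chars.find rest [':']).toNat + 1 := by omega
        rw [if_neg]
        rintro ⟨-, hin⟩
        rw [htn, List.take_succ_cons, PySem.Chars.isIn_eq_false_iff,
            List.singleton_infix_iff] at hin
        exact hin (by simp)
    · rw [if_neg ha]
      by_cases hac : a = ':'
      · subst hac
        rw [if_pos rfl, find_single_cons, if_pos rfl]
        have hnil : PySem.Chars.isIn ['='] (List.take ((0 : Int)).toNat (':' :: rest)) = false := by
          simp [PySem.Chars.isIn_eq_false_iff, List.singleton_infix_iff]
        rw [if_pos ⟨by decide, hnil⟩]
        norm_num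
      · rw [if_neg hac, ih, find_single_cons, if_neg (fun h => hac h)]
        by_cases hr : PySem.Chars.find rest [':'] = -1
        · rw [if_pos hr, if_neg (by rintro ⟨h, -⟩; exact h hr),
              if_neg (by rintro ⟨h, -⟩; exact h rfl)]
        · rw [if_neg hr]
          have h0 : 0 ≤ PySem.Chars.find rest [':'] := by
            have := PySem.Chars.neg_one_le_find rest [':']; omega
          have htn : (PySem.Chars.find rest [':'] + 1).toNat
              = (PySem.Chars.find rest [':']).toNat + 1 := by omega
          have hiniff :
              PySem.Chars.isIn ['=']
                ((a :: rest).take ((PySem.Chars.find rest [':'] + 1).toNat)) =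
              PySem.Chars.isIn ['='] (rest.take (PySem.Chars.find rest [':']).toNat) := by
            rw [htn, List.take_succ_cons]
            rcases hb : PySem.Chars.isIn ['='] (rest.take (PySem.Chars.find rest [':']).toNat)
              with _ | _
            · rw [PySem.Chars.isIn_eq_false_iff, List.singleton_infix_iff] at hb ⊢
              rw [List.mem_cons]
              push_neg
              exact ⟨fun h => ha h.symm, hb⟩
            · rw [PySem.Chars.isIn_iff_infix, List.singleton_infix_iff] at hb ⊢
              exact List.mem_cons_of_mem _ hb
          by_cases hin : PySem.Chars.isIn ['='] (rest.take (PySem.Chars.find rest [':']).toNat) = false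
          · rw [if_pos ⟨hr, hin⟩, if_pos ⟨by omega, by rw [hiniff]; exact hin⟩]
            have harg : (((i + 1 : Nat)) : Int) + PySem.Chars.find rest [':'] + 1
                = (i : Int) + (PySem.Chars.find rest [':'] + 1) + 1 := by push_cast; ring
            rw [harg]
          · rw [if_neg (by rintro ⟨-, h⟩; exact hin h),
                if_neg (by rintro ⟨-, h⟩; rw [hiniff] at h; exact hin h)]

-- membership of '=' in the prefix before the colon, as an index condition
theorem isIn_take_iff (cs : List Char) (a : Char) (c : Nat) :
    PySem.Chars.isIn [a] (cs.take c) = true ↔ ∃ j < c, cs[j]? = some a := by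
  rw [PySem.Chars.isIn_iff_infix, List.singleton_infix_iff, List.mem_take_iff_getElem]
  constructor
  · rintro ⟨i, hi, h⟩
    exact ⟨i, by omega, by rw [List.getElem?_eq_getElem (by omega)]; simp [h]⟩
  · rintro ⟨j, hj, h⟩
    obtain ⟨hlen, hval⟩ := List.getElem?_eq_some_iff.mp h
    exact ⟨j, by omega, hval⟩

-- "<=" occurring forces "=" to occur, and the characters at le_index
theorem le_pattern_chars (cs : List Char) (h : PySem.Chars.find cs ['<','='] ≠ -1) :
    cs[(PySem.Chars.find cs ['<','=']).toNat]? = some '<' ∧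
    cs[(PySem.Chars.find cs ['<','=']).toNat + 1]? = some '=' := by
  have h0 : 0 ≤ PySem.Chars.find cs ['<','='] := by
    have := PySem.Chars.neg_one_le_find cs ['<','=']; omega
  obtain ⟨hpre, -⟩ := PySem.Chars.find_spec (s := cs) (sub := ['<','=']) h0
  obtain ⟨t, ht⟩ := hpre
  set k := (PySem.Chars.find cs ['<','=']).toNat
  constructor
  · rw [← List.head?_drop, ← ht]; rfl
  · have : cs[k + 1]? = (cs.drop k)[1]? := by
      rw [List.getElem?_drop]
    rw [this, ← ht]; rfl

-- A's branch condition (via min of the filtered indices) equals "no '=' before the colon"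
theorem cond_iff (cs : List Char) (hc : PySem.Chars.find cs [':'] ≠ -1) :
    ((PySem.List.min? (([PySem.Chars.find cs ['='], PySem.Chars.find cs ['<','=']]).filter
        fun i => !(i == -1)) (fun y => y)).getD (-1) = -1 ∨
      PySem.Chars.find cs [':'] <
        (PySem.List.min? (([PySem.Chars.find cs ['='], PySem.Chars.find cs ['<','=']]).filter
          fun i => !(i == -1)) (fun y => y)).getD (-1))
    ↔ PySem.Chars.isIn ['='] (cs.take (PySem.Chars.find cs [':']).toNat) = false := by
  have h0c : 0 ≤ PySem.Chars.find cs [':'] := by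
    have := PySem.Chars.neg_one_le_find cs [':']; omega
  have hcc : cs[(PySem.Chars.find cs [':']).toNat]? = some ':' := find_single_char_at cs ':' hc
  set c := (PySem.Chars.find cs [':']).toNat with hcdef
  have hR : PySem.Chars.isIn ['='] (cs.take c) = false ↔ ¬ ∃ j < c, cs[j]? = some '=' := by
    rw [← isIn_take_iff cs '=' c]; simp
  rw [hR]
  by_cases heq : PySem.Chars.find cs ['='] = -1
  · -- no '=' at all: no '<=' either, the filtered index list is empty, both strip
    have hnone : ∀ j : Nat, cs[j]? ≠ some '=' := by
      intro j hj
      exact (find_single_char_le cs '=' j hj).1 heq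
    have hle : PySem.Chars.find cs ['<','='] = -1 := by
      by_contra hle
      exact hnone _ (le_pattern_chars cs hle).2
    have ha : (PySem.List.min? (([PySem.Chars.find cs ['='], PySem.Chars.find cs ['<','=']]).filter
        fun i => !(i == -1)) (fun y => y)).getD (-1) = -1 := by
      rw [heq, hle]; simp [PySem.List.min?]
    rw [ha]
    constructor
    · rintro - ⟨j, -, hj⟩; exact hnone j hj
    · intro _; left; rfl
  · have h0e : 0 ≤ PySem.Chars.find cs ['='] := by
      have := PySem.Chars.neg_one_le_find cs ['=']; omega
    have hce : cs[(PySem.Chars.find cs ['=']).toNat]? = some '=' := find_single_char_at cs '=' heq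
    have hne_c : (PySem.Chars.find cs ['=']).toNat ≠ c := by
      intro h; rw [h, hcc] at hce; simp at hce
    have hkey : (PySem.Chars.find cs [':'] < PySem.Chars.find cs ['=']) ↔
        ¬ ∃ j < c, cs[j]? = some '=' := by
      constructor
      · rintro hlt ⟨j, hjc, hj⟩
        exact find_single_char_min cs '=' h0e j (by omega) hj
      · intro hno
        by_contra hge
        exact hno ⟨(PySem.Chars.find cs ['=']).toNat, by omega, hce⟩
    by_cases hle : PySem.Chars.find cs ['<','='] = -1
    · have ha : (PySem.List.min? (([PySem.Chars.find cs ['='], PySem.Chars.find cs ['<','=']]).filter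
          fun i => !(i == -1)) (fun y => y)).getD (-1) = PySem.Chars.find cs ['='] := by
        rw [hle]; simp [PySem.List.min?, heq]
      rw [ha]
      constructor
      · rintro (h | h)
        · exact absurd h heq
        · exact hkey.mp h
      · intro h; exact Or.inr (hkey.mpr h)
    · have h0l : 0 ≤ PySem.Chars.find cs ['<','='] := by
        have := PySem.Chars.neg_one_le_find cs ['<','=']; omega
      obtain ⟨hl1, hl2⟩ := le_pattern_chars cs hle
      have heqle : (PySem.Chars.find cs ['=']).toNat ≤ (PySem.Chars.find cs ['<','=']).toNat + 1 :=
        (find_single_char_le cs '=' _ hl2).2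
      have hnl_c : (PySem.Chars.find cs ['<','=']).toNat ≠ c := by
        intro h; rw [h, hcc] at hl1; simp at hl1
      have ha : (PySem.List.min? (([PySem.Chars.find cs ['='], PySem.Chars.find cs ['<','=']]).filter
          fun i => !(i == -1)) (fun y => y)).getD (-1) =
          min (PySem.Chars.find cs ['=']) (PySem.Chars.find cs ['<','=']) := by
        simp [heq, hle, PySem.List.min?_id_cons]
      rw [ha]
      have hmin0 : (0 : Int) ≤ min (PySem.Chars.find cs ['=']) (PySem.Chars.find cs ['<','=']) :=
        le_min h0e h0l
      have hcm : (PySem.Chars.find cs [':'] <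
          min (PySem.Chars.find cs ['=']) (PySem.Chars.find cs ['<','='])) ↔
          PySem.Chars.find cs [':'] < PySem.Chars.find cs ['='] := by
        constructor
        · intro h; exact lt_of_lt_of_le h (min_le_left _ _)
        · intro h; exact lt_min h (by omega)
      constructor
      · rintro (h | h)
        · omega
        · exact hkey.mp (hcm.mp h)
      · intro h; exact Or.inr (hcm.mpr (hkey.mpr h))

theorem strip_case_label_core (text : String) :
    strip_case_label_py text = strip_case_label_py_alt text := by
  unfold strip_case_label_py strip_case_label_py_alt
  rw [stripScan_spec]
  simp only [PySem.Str.find_eq, show ":".toList = [':'] from rfl,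
    show "=".toList = ['='] from rfl, show "<=".toList = ['<','='] from rfl,
    Nat.cast_zero, zero_add]
  by_cases hc : PySem.Chars.find text.toList [':'] = -1
  · rw [if_pos hc, if_neg (by rintro ⟨h, -⟩; exact h hc)]
  · rw [if_neg hc]
    by_cases hin : PySem.Chars.isIn ['=']
        (text.toList.take (PySem.Chars.find text.toList [':']).toNat) = false
    · rw [if_pos ((cond_iff text.toList hc).mpr hin), if_pos ⟨hc, hin⟩]
    · rw [if_neg (fun hA => hin ((cond_iff text.toList hc).mp hA)),
          if_neg (by rintro ⟨-, h⟩; exact hin h)]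

-- ===== VERDICT (by name: the statement is the Claim_ definition above) =====
theorem strip_case_label_py_spec : Claim_equal_strip_case_label_py := by
  intro text _
  show strip_case_label_py text = strip_case_label_py_alt text
  exact strip_case_label_core text
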